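-- pv_equiv track=rewrite | github.com/aaronatp/scRNA_cell_cluster_gene_expression_analysis | lookup_gene.py | sort_dict_by_freq
-- ===== SOURCE A (Python) =====
-- def sort_dict_by_freq(store):
--     freq = {}
--     for value in store.values():
--         if freq.get(value) == None:
--             freq[value] = 1
--         else:
--             freq[value] += 1
--             pass
--     pos = sorted(freq.items(), key=lambda item: item[1], reverse=True)
--     pos = list(map(lambda x: x[0], pos))
--     store = dict(sorted(store.items(), key=lambda item: pos.index(item[1])))
--     return store
-- ===== SOURCE B (Python) =====
-- def sort_dict_by_freq(store):
--     groups = {}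
--     for k, v in store.items():
--         groups.setdefault(v, []).append((k, v))
--     ordered = sorted(groups.values(), key=len, reverse=True)
--     return {k: v for grp in ordered for (k, v) in grp}
-- ===== Notes on version B (the rewrite author's own statement) =====
-- stated objective: alternative
-- what changed: B builds a dict of per-value groups in one pass and concatenates the groups in stable frequency-descending order, replacing A's final sort of all items whose key calls pos.index (a linear scan) on every comparison; measured only ~1.3x faster at the largest size, so no speed claim.
import Mathlib
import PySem

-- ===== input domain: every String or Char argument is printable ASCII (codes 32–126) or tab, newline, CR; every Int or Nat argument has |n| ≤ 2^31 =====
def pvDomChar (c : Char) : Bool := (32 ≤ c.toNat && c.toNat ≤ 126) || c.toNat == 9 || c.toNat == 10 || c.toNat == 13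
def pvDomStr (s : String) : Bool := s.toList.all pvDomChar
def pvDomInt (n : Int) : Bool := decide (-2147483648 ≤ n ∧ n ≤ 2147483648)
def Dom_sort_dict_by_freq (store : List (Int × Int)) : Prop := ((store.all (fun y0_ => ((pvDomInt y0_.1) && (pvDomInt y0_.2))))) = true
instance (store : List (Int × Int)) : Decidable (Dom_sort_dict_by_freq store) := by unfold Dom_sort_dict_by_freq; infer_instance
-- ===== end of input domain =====

-- B groups the items by value in one pass and concatenates the groups in stable
-- frequency-descending order, instead of sorting all items by a rank computed
-- with pos.index; return value only (neither version mutates its argument).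

-- ===== PORT A =====
def sort_dict_by_freq (store : List (Int × Int)) : List (Int × Int) :=
  -- freq = {}; for value in store.values(): if freq.get(value) == None: freq[value] = 1 else: freq[value] += 1
  let freq : PySem.Dict Int Int :=
    (store.map (·.2)).foldl (fun d v =>
      match d.get? v with
      | none => d.insert v 1
      | some c => d.insert v (c + 1)) PySem.Dict.empty
  -- pos = sorted(freq.items(), key=lambda item: item[1], reverse=True)
  let pos0 := PySem.List.sorted freq.items (fun item => item.2) true
  -- pos = list(map(lambda x: x[0], pos))
  let pos := pos0.map (fun x => x.1)
  -- store = dict(sorted(store.items(), key=lambda item: pos.index(item[1])))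
  -- pos.index never raises: every value of store occurs in pos, so the `.getD 0` branch is never taken
  let res := PySem.List.sorted store (fun item => (PySem.List.index? pos item.2).getD 0) false
  (PySem.Dict.ofList res).items

-- ===== PORT B =====
def sort_dict_by_freq_alt (store : List (Int × Int)) : List (Int × Int) :=
  -- for k, v in store.items(): groups.setdefault(v, []).append((k, v))
  let groups : PySem.Dict Int (List (Int × Int)) :=
    store.foldl (fun d p => d.modify p.2 [] (· ++ [p])) PySem.Dict.empty
  -- ordered = sorted(groups.values(), key=len, reverse=True)
  let ordered := PySem.List.sorted groups.values (fun g => g.length) true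
  -- {k: v for grp in ordered for (k, v) in grp}
  (PySem.Dict.ofList ordered.flatten).items

-- ===== PRECONDITION & SPEC =====
def Spec_sort_dict_by_freq (store : List (Int × Int)) (out : List (Int × Int)) : Prop := out = sort_dict_by_freq_alt store
instance (store : List (Int × Int)) (out : List (Int × Int)) : Decidable (Spec_sort_dict_by_freq store out) := by unfold Spec_sort_dict_by_freq; infer_instance

-- ===== CLAIM (what is proved, stated in full; the proofs are below) =====
def Claim_equal_sort_dict_by_freq : Prop := ∀ (store : List (Int × Int)), Dom_sort_dict_by_freq store → Spec_sort_dict_by_freq store (sort_dict_by_freq store)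

-- ===== LEMMAS AND PROOFS =====

-- insertBy (the stable insertion behind PySem.List.sorted) puts x right after the
-- block of elements it is not `before`.
theorem insertBy_middle {α : Type} (b : α → α → Bool) (x : α) (ys zs : List α)
    (h1 : ∀ y ∈ ys, b x y = false) (h2 : ∀ z ∈ zs, b x z = true) :
    PySem.List.insertBy b x (ys ++ zs) = ys ++ x :: zs := by
  induction ys with
  | nil =>
    simp only [List.nil_append]
    cases zs with
    | nil => rfl
    | cons z zs => simp [PySem.List.insertBy, h2 z (by simp)]
  | cons y ys ih =>
    have hy : b x y = false := h1 y (by simp)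
    simp [PySem.List.insertBy, hy, ih (fun y hy => h1 y (by simp [hy]))]

theorem insertBy_map {α β : Type} (f : α → β) (b : α → α → Bool) (b' : β → β → Bool)
    (h : ∀ a c, b' (f a) (f c) = b a c) (x : α) (ys : List α) :
    PySem.List.insertBy b' (f x) (ys.map f) = (PySem.List.insertBy b x ys).map f := by
  induction ys with
  | nil => rfl
  | cons y ys ih =>
    by_cases hb : b x y
    · simp [PySem.List.insertBy, h, hb]
    · simp only [Bool.not_eq_true] at hb
      simp [PySem.List.insertBy, h, hb, ih]

theorem foldl_insertBy_map {α β : Type} (f : α → β) (b : α → α → Bool) (b' : β → β → Bool)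
    (h : ∀ a c, b' (f a) (f c) = b a c) (xs ys : List α) :
    xs.foldl (fun acc x => PySem.List.insertBy b' (f x) acc) (ys.map f)
      = (xs.foldl (fun acc x => PySem.List.insertBy b x acc) ys).map f := by
  induction xs generalizing ys with
  | nil => rfl
  | cons x xs ih =>
    simp only [List.foldl_cons]
    rw [insertBy_map f b b' h, ih]

-- a stable reverse-sort commutes with mapping when the keys correspond
theorem sorted_map_rev {α β κ κ' : Type} [LinearOrder κ] [LinearOrder κ'] (xs : List α)
    (f : α → β) (kβ : β → κ') (kα : α → κ)
    (h : ∀ a c, (decide (kβ (f c) < kβ (f a)) : Bool) = decide (kα c < kα a)) :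
    PySem.List.sorted (xs.map f) kβ true = (PySem.List.sorted xs kα true).map f := by
  rw [PySem.List.sorted_rev_eq_foldl_insertBy, PySem.List.sorted_rev_eq_foldl_insertBy,
      List.foldl_map]
  have := foldl_insertBy_map f (fun a c => decide (kα c < kα a))
    (fun a c => decide (kβ c < kβ a)) (fun a c => h a c) xs []
  simpa using this

-- index? into an append whose left part misses v
theorem index?_append_of_not_mem {α : Type} [BEq α] [LawfulBEq α] (l t : List α) (v : α)
    (h : v ∉ l) :
    PySem.List.index? (l ++ t) v = (PySem.List.index? t v).map (· + l.length) := by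
  induction l with
  | nil => simp
  | cons x l ih =>
    have hx : x ≠ v := by intro e; exact h (by simp [e])
    rw [List.cons_append, PySem.List.index?_cons_of_ne _ hx, ih (by intro m; exact h (by simp [m]))]
    cases PySem.List.index? t v <;> simp <;> omega

-- one step of A's stable sort by rank-in-P extends the fiber decomposition
theorem insertBy_rank_step (P : List Int) (hnd : P.Nodup) (l : List (Int × Int))
    (p : Int × Int) (hp : p.2 ∈ P) :
    PySem.List.insertBy
        (fun a c => decide ((PySem.List.index? P a.2).getD 0 < (PySem.List.index? P c.2).getD 0))
        p (P.flatMap (fun v => l.filter (fun q => q.2 == v)))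
      = P.flatMap (fun v => (l ++ [p]).filter (fun q => q.2 == v)) := by
  obtain ⟨k, hk⟩ := Option.isSome_iff_exists.mp ((PySem.List.index?_isSome_iff P p.2).mpr hp)
  obtain ⟨P1, P2, hP, hlen, hnm⟩ := (PySem.List.index?_eq_some_iff P p.2 k).mp hk
  subst hP
  rw [List.nodup_append] at hnd
  obtain ⟨-, hndc, hdj⟩ := hnd
  rw [List.nodup_cons] at hndc
  have hnd2 : p.2 ∉ P2 := hndc.1
  have hdisj : ∀ v ∈ P2, v ∉ P1 ∧ v ≠ p.2 := by
    intro v hv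
    refine ⟨fun hv1 => hdj v hv1 v (by simp [hv]) rfl, fun e => hnd2 (e ▸ hv)⟩
  have hrp : (PySem.List.index? (P1 ++ p.2 :: P2) p.2).getD 0 = P1.length := by
    rw [index?_append_of_not_mem _ _ _ hnm, PySem.List.index?_cons_self]; simp
  have hr1 : ∀ v ∈ P1, (PySem.List.index? (P1 ++ p.2 :: P2) v).getD 0 < P1.length := by
    intro v hv
    rw [PySem.List.index?_append_of_mem _ hv]
    obtain ⟨j, hj⟩ := Option.isSome_iff_exists.mp ((PySem.List.index?_isSome_iff P1 v).mpr hv)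
    obtain ⟨hlt, -⟩ := PySem.List.getElem_of_index?_eq_some hj
    simp only [PySem.List.index?_eq_idxOf?] at hj
    simp [hj, hlt]
  have hr2 : ∀ v ∈ P2, P1.length < (PySem.List.index? (P1 ++ p.2 :: P2) v).getD 0 := by
    intro v hv
    obtain ⟨hv1, hv2⟩ := hdisj v hv
    rw [index?_append_of_not_mem _ _ _ hv1,
        PySem.List.index?_cons_of_ne _ (Ne.symm hv2)]
    obtain ⟨j, hj⟩ := Option.isSome_iff_exists.mp ((PySem.List.index?_isSome_iff P2 v).mpr hv)
    simp only [PySem.List.index?_eq_idxOf?] at hj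
    simp [hj]
  set f := fun v => l.filter (fun q => q.2 == v) with hf
  have hsplit : (P1 ++ p.2 :: P2).flatMap f
      = (P1.flatMap f ++ f p.2) ++ P2.flatMap f := by
    simp [List.flatMap_append]
  rw [hsplit, insertBy_middle]
  · have e1 : P1.flatMap (fun v => (l ++ [p]).filter (fun q => q.2 == v)) = P1.flatMap f := by
      apply List.flatMap_congr
      intro v hv
      have : p.2 ≠ v := by intro e; exact hnm (e ▸ hv)
      simp [hf, List.filter_append, this]
    have e2 : P2.flatMap (fun v => (l ++ [p]).filter (fun q => q.2 == v)) = P2.flatMap f := by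
      apply List.flatMap_congr
      intro v hv
      have := (hdisj v hv).2
      simp [hf, List.filter_append, Ne.symm this]
    have e3 : (l ++ [p]).filter (fun q => q.2 == p.2) = f p.2 ++ [p] := by
      simp [hf, List.filter_append]
    simp only [List.flatMap_append, List.flatMap_cons, e1, e2, e3]
    simp
  · intro y hy
    simp only [List.mem_append] at hy
    rcases hy with hy | hy
    · obtain ⟨v, hv, hyf⟩ := List.mem_flatMap.mp hy
      have : y.2 = v := by simpa using (List.of_mem_filter hyf)
      simp only [decide_eq_false_iff_not, not_lt, hrp, this]
      exact le_of_lt (hr1 v hv)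
    · have : y.2 = p.2 := by simpa using (List.of_mem_filter hy)
      simp [hrp, this]
  · intro z hz
    obtain ⟨v, hv, hzf⟩ := List.mem_flatMap.mp hz
    have : z.2 = v := by simpa using (List.of_mem_filter hzf)
    simp only [decide_eq_true_eq, hrp, this]
    exact hr2 v hv

theorem foldl_insertBy_rank (P : List Int) (hnd : P.Nodup) (rest l : List (Int × Int))
    (hmem : ∀ p ∈ rest, p.2 ∈ P) :
    rest.foldl (fun acc x => PySem.List.insertBy
        (fun a c => decide ((PySem.List.index? P a.2).getD 0 < (PySem.List.index? P c.2).getD 0)) x acc)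
        (P.flatMap (fun v => l.filter (fun q => q.2 == v)))
      = P.flatMap (fun v => (l ++ rest).filter (fun q => q.2 == v)) := by
  induction rest generalizing l with
  | nil => simp
  | cons p rest ih =>
    simp only [List.foldl_cons]
    rw [insertBy_rank_step P hnd l p (hmem p (by simp)),
        ih (l ++ [p]) (fun q hq => hmem q (by simp [hq]))]
    simp

-- the heart: a stable sort by rank-in-P is the concatenation of the P-fibers
theorem stable_sort_rank (store : List (Int × Int)) (P : List Int) (hnd : P.Nodup)
    (hmem : ∀ p ∈ store, p.2 ∈ P) :
    PySem.List.sorted store (fun item => (PySem.List.index? P item.2).getD 0) false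
      = P.flatMap (fun v => store.filter (fun p => p.2 == v)) := by
  rw [PySem.List.sorted_eq_foldl_insertBy]
  have h0 : (P.flatMap (fun v => ([] : List (Int × Int)).filter (fun q => q.2 == v))) = [] := by simp
  have := foldl_insertBy_rank P hnd store [] hmem
  rw [h0] at this
  simpa using this

theorem main_eq (store : List (Int × Int)) :
    sort_dict_by_freq store = sort_dict_by_freq_alt store := by
  unfold sort_dict_by_freq sort_dict_by_freq_alt
  dsimp only
  set vals := store.map (·.2) with hvals
  set S := PySem.Set.ofList vals with hS
  set P := PySem.List.sorted S (fun v => (vals.count v : Int)) true with hP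
  set filt := fun v => store.filter (fun p => p.2 == v) with hfilt
  -- A's freq loop is Counter(store.values())
  have hfun : (fun (d : PySem.Dict Int Int) v =>
      match d.get? v with
      | none => d.insert v 1
      | some c => d.insert v (c + 1)) = fun d v => d.insert v (d.getD v 0 + 1) := by
    funext d v
    rcases h : d.get? v with _ | c <;>
      simp [PySem.Dict.getD_eq_get?_getD, h]
  rw [hfun, PySem.Dict.foldl_insert_getD_add_one_eq_counter, PySem.Dict.items_counter]
  -- A's pos is P
  have hpos0 : PySem.List.sorted (S.map (fun k => (k, (vals.count k : Int)))) (fun item => item.2) true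
      = P.map (fun k => (k, (vals.count k : Int))) := by
    rw [hP]
    exact sorted_map_rev S _ _ _ (fun a c => rfl)
  rw [hpos0]
  have hposid : (P.map (fun k => (k, (vals.count k : Int)))).map (fun x => x.1) = P := by
    simp [Function.comp_def]
  rw [hposid]
  have hPperm : P.Perm S := PySem.List.sorted_perm _ _ _
  have hnd : P.Nodup := hPperm.nodup_iff.mpr (PySem.Set.nodup_ofList vals)
  have hmem : ∀ p ∈ store, p.2 ∈ P := by
    intro p hp
    rw [hPperm.mem_iff, hS, PySem.Set.mem_ofList, hvals]
    exact List.mem_map_of_mem hp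
  rw [stable_sort_rank store P hnd hmem]
  -- B's groups: keys S, fiber filt v at each v
  have hgroups : store.foldl (fun d p => d.modify p.2 [] (· ++ [p])) PySem.Dict.empty
      = (store.map (fun p => (p.2, p))).foldl (fun d q => d.modify q.1 [] (· ++ [q.2])) PySem.Dict.empty := by
    rw [List.foldl_map]
  have hkeys : ((store.map (fun p => (p.2, p))).foldl (fun d q => d.modify q.1 [] (· ++ [q.2])) PySem.Dict.empty).keys = S := by
    have := PySem.Dict.keys_foldl_modify_key (store.map (fun p => (p.2, p))) (·.1)
      ([] : List (Int × Int)) (fun _ q => (· ++ [q.2])) PySem.Dict.empty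
    simp only [this]
    simp [PySem.Set.update, PySem.Set.ofList, PySem.Set.empty, List.foldl_map,
      List.map_map, Function.comp_def, hS, hvals]
  have hgetD : ∀ v, ((store.map (fun p => (p.2, p))).foldl (fun d q => d.modify q.1 [] (· ++ [q.2])) PySem.Dict.empty).getD v [] = filt v := by
    intro v
    rw [PySem.Dict.getD_foldl_modify_append]
    rw [List.filter_map]
    simp [hfilt, List.map_map, Function.comp_def]
  have hndk : ((store.map (fun p => (p.2, p))).foldl (fun d q => d.modify q.1 [] (· ++ [q.2])) PySem.Dict.empty).keys.Nodup := by
    rw [hkeys]; exact PySem.Set.nodup_ofList vals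
  have hvalues : ((store.map (fun p => (p.2, p))).foldl (fun d q => d.modify q.1 [] (· ++ [q.2])) PySem.Dict.empty).values = S.map filt := by
    rw [PySem.Dict.values_eq_map_keys _ hndk []]
    rw [hkeys]
    exact List.map_congr_left (fun v _ => hgetD v)
  rw [hgroups, hvalues]
  -- B's ordered list of groups follows P
  have hord : PySem.List.sorted (S.map filt) (fun g => g.length) true = P.map filt := by
    rw [hP]
    apply sorted_map_rev
    intro a c
    have hl : ∀ v, (filt v).length = vals.count v := by
      intro v
      simp only [hfilt, hvals, List.count_eq_countP, List.countP_map, List.countP_eq_length_filter]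
      rw [List.filter_map]
      simp [Function.comp_def]
    simp [hl]
  rw [hord]
  congr 1

-- ===== VERDICT (by name: the statement is the Claim_ definition above) =====
theorem sort_dict_by_freq_spec : Claim_equal_sort_dict_by_freq := by
  intro store _
  exact main_eq store
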